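-- pv_equiv track=rewrite | github.com/Yehonatan-Lidor/Virtual-Assistant | Music&Weather/parser.py | count_am_is_are
-- ===== SOURCE A (Python) =====
-- def count_am_is_are(sentence):
--     WORDS = ("am", "is", "are", "s", "m")
--     sentence_lst = sentence.split(' ')
--     count = 0
--     for word in sentence_lst:
--         if word in WORDS:
--             count += 1
--     return count
-- ===== SOURCE B (Python) =====
-- def count_am_is_are(sentence):
--     counts = {}
--     for word in sentence.split(' '):
--         counts[word] = counts.get(word, 0) + 1
--     return sum(counts.get(w, 0) for w in ("am", "is", "are", "s", "m"))
-- ===== Notes on version B (the rewrite author's own statement) =====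
-- stated objective: alternative
-- what changed: B builds a frequency table of all tokens in one pass and then sums the counts of the five fixed keywords, instead of testing each token for membership in the keyword tuple.
import Mathlib
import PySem

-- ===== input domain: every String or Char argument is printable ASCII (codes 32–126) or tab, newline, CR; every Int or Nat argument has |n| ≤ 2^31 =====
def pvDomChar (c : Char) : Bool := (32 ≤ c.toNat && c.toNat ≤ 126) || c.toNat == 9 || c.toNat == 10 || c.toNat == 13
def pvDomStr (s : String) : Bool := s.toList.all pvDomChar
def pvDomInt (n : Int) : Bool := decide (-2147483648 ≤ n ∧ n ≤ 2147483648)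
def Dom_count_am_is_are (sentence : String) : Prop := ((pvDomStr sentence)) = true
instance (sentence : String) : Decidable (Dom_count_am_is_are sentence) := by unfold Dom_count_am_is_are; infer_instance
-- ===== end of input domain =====

-- B builds a token-frequency dict in one pass, then sums the counts of the five keywords;
-- A tests each token for membership in the keyword tuple. Same cost, different traversal.

-- ===== PORT A =====
def count_am_is_are (sentence : String) : Int :=
  let WORDS : List String := ["am", "is", "are", "s", "m"]
  let sentence_lst := (PySem.Str.split? sentence " ").getD []
  sentence_lst.foldl (fun count word => if word ∈ WORDS then count + 1 else count) 0

-- ===== PORT B =====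
def count_am_is_are_alt (sentence : String) : Int :=
  let counts : PySem.Dict String Int :=
    ((PySem.Str.split? sentence " ").getD []).foldl
      (fun d word => d.insert word (d.getD word 0 + 1)) PySem.Dict.empty
  ((["am", "is", "are", "s", "m"] : List String).map (fun w => counts.getD w 0)).sum

-- ===== PRECONDITION & SPEC =====
def Spec_count_am_is_are (sentence : String) (out : Int) : Prop := out = count_am_is_are_alt sentence
instance (sentence : String) (out : Int) : Decidable (Spec_count_am_is_are sentence out) := by unfold Spec_count_am_is_are; infer_instance

-- ===== CLAIM (what is proved, stated in full; the proofs are below) =====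
def Claim_equal_count_am_is_are : Prop := ∀ (sentence : String), Dom_count_am_is_are sentence → Spec_count_am_is_are sentence (count_am_is_are sentence)

-- ===== LEMMAS AND PROOFS =====

-- counting tokens that belong to the five-word list = summing the five individual counts
theorem countP_mem_five (l : List String) :
    (l.countP (fun w => decide (w ∈ (["am", "is", "are", "s", "m"] : List String))) : Int)
      = (l.count "am" : Int) + l.count "is" + l.count "are" + l.count "s" + l.count "m" := by
  induction l with
  | nil => simp
  | cons x xs ih =>
    simp only [List.countP_cons, List.count_cons]
    by_cases h1 : x = "am" <;> by_cases h2 : x = "is" <;> by_cases h3 : x = "are" <;>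
      by_cases h4 : x = "s" <;> by_cases h5 : x = "m" <;>
      simp_all <;> omega

-- ===== VERDICT (by name: the statement is the Claim_ definition above) =====
theorem count_am_is_are_spec : Claim_equal_count_am_is_are := by
  intro sentence _
  unfold Spec_count_am_is_are count_am_is_are count_am_is_are_alt
  simp only [PySem.List.foldl_ite_add_one, PySem.Dict.getD_foldl_insert_add_one,
    PySem.Dict.getD_empty, List.map, List.sum_cons, List.sum_nil]
  rw [countP_mem_five]
  ring
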